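-- pv_equiv track=rewrite | github.com/aveusalex/truth_table | Tabela_V2.py | operadores_da_sentenca
-- ===== SOURCE A (Python) =====
-- def operadores_da_sentenca(coluna, quantidade_de_linhas, frequencia):
--     '''
--     Definirá os bools para a sentença específica. (ex: p receberá 1 1 0 0 ...)
--
--     '''
--
--     aux = 0
--     operadores = []
--     lista_operadores_da_sentenca = []
--     while aux < 2 ** coluna:
--         for i in range(frequencia):
--             operadores.append(1)
--         for i in range(frequencia):
--             operadores.append(0)
--         aux += 1
--
--     return operadores
-- ===== SOURCE B (Python) =====
-- def operadores_da_sentenca(coluna, quantidade_de_linhas, frequencia):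
--     '''
--     Definirá os bools para a sentença específica. (ex: p receberá 1 1 0 0 ...)
--     '''
--     def rep(n):
--         if n == 0:
--             return [1] * frequencia + [0] * frequencia
--         half = rep(n - 1)
--         return half + half
--     return rep(coluna)
-- ===== Notes on version B (the rewrite author's own statement) =====
-- stated objective: alternative
-- what changed: Replaces A's while-loop that appends one element at a time 2^coluna times by recursive doubling on coluna: the base case is the single ones/zeros block built via list multiplication, and each recursion level concatenates the previous result with itself.
-- outside the precondition, e.g. on operadores_da_sentenca(-1, 4, 2): A returns [1, 1, 0, 0], B raises RecursionError
import Mathlib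
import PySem

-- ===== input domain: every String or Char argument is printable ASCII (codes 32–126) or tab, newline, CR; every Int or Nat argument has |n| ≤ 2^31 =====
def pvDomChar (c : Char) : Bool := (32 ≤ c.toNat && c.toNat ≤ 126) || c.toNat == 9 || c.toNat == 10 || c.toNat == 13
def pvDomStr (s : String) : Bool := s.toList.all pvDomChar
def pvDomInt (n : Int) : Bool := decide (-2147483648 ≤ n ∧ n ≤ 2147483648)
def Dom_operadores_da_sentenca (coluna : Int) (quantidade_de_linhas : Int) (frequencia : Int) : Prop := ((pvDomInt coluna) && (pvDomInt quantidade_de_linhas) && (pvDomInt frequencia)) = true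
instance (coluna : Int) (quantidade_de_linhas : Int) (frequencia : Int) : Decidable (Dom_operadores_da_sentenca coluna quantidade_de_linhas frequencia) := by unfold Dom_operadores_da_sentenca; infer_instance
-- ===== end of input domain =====

-- B builds the result by recursive doubling on coluna (base case = one ones/zeros block;
-- each level concatenates the previous result with itself) instead of A's while-loop that
-- appends single elements 2^coluna times (objective: alternative).

-- ===== PORT A =====
-- inner 'for i in range(frequencia): operadores.append(v)'
def pvInnerA (frequencia : Int) (v : Int) (ops : List Int) : List Int :=
  (PySem.List.pyRange 0 frequencia 1).foldl (fun acc _ => acc ++ [v]) ops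

-- body of 'while aux < 2 ** coluna', run a fixed number of times
def pvLoopA (frequencia : Int) : Nat → List Int → List Int
  | 0, ops => ops
  | k + 1, ops => pvLoopA frequencia k (pvInnerA frequencia 0 (pvInnerA frequencia 1 ops))

-- Number of iterations of 'while aux < 2 ** coluna': 2^coluna for coluna ≥ 0 (int power);
-- for coluna < 0 Python computes the FLOAT 2.0**coluna, so the loop runs once while that
-- float is positive (coluna ≥ -1074, the subnormal limit) and zero times once it
-- underflows to 0.0 (coluna ≤ -1075); ported exactly.
def operadores_da_sentenca (coluna : Int) (quantidade_de_linhas : Int) (frequencia : Int) : List Int :=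
  pvLoopA frequencia
    (if 0 ≤ coluna then 2 ^ coluna.toNat else if -1074 ≤ coluna then 1 else 0) []

-- ===== PORT B =====
-- '[1] * frequencia + [0] * frequencia' (Python list * n is empty for n ≤ 0)
def pvBlockB (frequencia : Int) : List Int :=
  List.replicate frequencia.toNat 1 ++ List.replicate frequencia.toNat 0

-- 'def rep(n): if n == 0: return block; half = rep(n-1); return half + half'
-- (recursion depth coluna; for coluna < 0 the Python recursion never terminates, outside Pre_)
def pvRepB (frequencia : Int) : Nat → List Int
  | 0 => pvBlockB frequencia
  | n + 1 => pvRepB frequencia n ++ pvRepB frequencia n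

def operadores_da_sentenca_alt (coluna : Int) (quantidade_de_linhas : Int) (frequencia : Int) : List Int :=
  pvRepB frequencia coluna.toNat

-- ===== PRECONDITION & SPEC =====
-- Pre_ excludes coluna < 0: there Python's '2 ** coluna' is a float, so A's loop count is a
-- float-comparison artefact (one block, or [] after underflow) while B's recursion on coluna
-- never reaches its base case and raises RecursionError.
def Pre_operadores_da_sentenca (coluna : Int) (quantidade_de_linhas : Int) (frequencia : Int) : Prop :=
  0 ≤ coluna
instance (coluna : Int) (quantidade_de_linhas : Int) (frequencia : Int) : Decidable (Pre_operadores_da_sentenca coluna quantidade_de_linhas frequencia) := by unfold Pre_operadores_da_sentenca; infer_instance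
def pvWitness_operadores_da_sentenca : Int × Int × Int := (2, 8, 2)

def Spec_operadores_da_sentenca (coluna : Int) (quantidade_de_linhas : Int) (frequencia : Int) (out : List Int) : Prop := out = operadores_da_sentenca_alt coluna quantidade_de_linhas frequencia
instance (coluna : Int) (quantidade_de_linhas : Int) (frequencia : Int) (out : List Int) : Decidable (Spec_operadores_da_sentenca coluna quantidade_de_linhas frequencia out) := by unfold Spec_operadores_da_sentenca; infer_instance

-- ===== CLAIM =====
def Claim_equal_operadores_da_sentenca : Prop := ∀ (coluna : Int) (quantidade_de_linhas : Int) (frequencia : Int), Dom_operadores_da_sentenca coluna quantidade_de_linhas frequencia → Pre_operadores_da_sentenca coluna quantidade_de_linhas frequencia → Spec_operadores_da_sentenca coluna quantidade_de_linhas frequencia (operadores_da_sentenca coluna quantidade_de_linhas frequencia)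

-- ===== LEMMAS AND PROOFS =====
theorem foldl_append_replicate {α : Type} (v : α) :
    ∀ (l : List Int) (ops : List α),
      l.foldl (fun acc _ => acc ++ [v]) ops = ops ++ List.replicate l.length v := by
  intro l
  induction l with
  | nil => intro ops; simp
  | cons x xs ih =>
      intro ops
      simp only [List.foldl, ih, List.length_cons]
      rw [List.append_assoc]
      simp [List.replicate_succ]

theorem pvInnerA_eq (f v : Int) (ops : List Int) :
    pvInnerA f v ops = ops ++ List.replicate f.toNat v := by
  unfold pvInnerA
  rw [foldl_append_replicate, PySem.List.length_pyRange_one]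
  simp

theorem pvLoopA_eq (f : Int) :
    ∀ (k : Nat) (ops : List Int),
      pvLoopA f k ops = ops ++ (List.replicate k (pvBlockB f)).flatten := by
  intro k
  induction k with
  | zero => intro ops; simp [pvLoopA]
  | succ n ih =>
      intro ops
      simp only [pvLoopA, ih, pvInnerA_eq, List.replicate_succ, List.flatten_cons, pvBlockB]
      simp

theorem pvRepB_eq (f : Int) :
    ∀ (n : Nat), pvRepB f n = (List.replicate (2 ^ n) (pvBlockB f)).flatten := by
  intro n
  induction n with
  | zero => simp [pvRepB]
  | succ k ih =>
      simp only [pvRepB, ih, pow_succ, Nat.mul_two, List.replicate_add, List.flatten_append]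

-- ===== VERDICT =====
theorem operadores_da_sentenca_spec : Claim_equal_operadores_da_sentenca := by
  intro c q f _ hpre
  unfold Spec_operadores_da_sentenca operadores_da_sentenca operadores_da_sentenca_alt
  rw [if_pos (show (0:Int) ≤ c from hpre), pvLoopA_eq, pvRepB_eq]
  simp
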